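-- pv_equiv track=rewrite | github.com/zhouli121018/core | linuxOperation/app/utils/dept_session.py | loop_remove_repeat_departmentids
-- ===== SOURCE A (Python) =====
-- def loop_remove_repeat_departmentids(dpt_id, parent_id, department_ids, dataDept):
--     """
--     删除部门重复（子部门是否包含在父部门中）
--     :param obj:
--     :param dpt_id:
--     :param department_ids:
--     :return:
--     """
--     if parent_id in (0, -1):
--         return dpt_id
--     if parent_id in department_ids:
--         return None
--     if parent_id not in dataDept:
--         return dpt_id
--     parent_id = dataDept[parent_id]['parent']
--     return loop_remove_repeat_departmentids(dpt_id, parent_id, department_ids, dataDept)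
-- ===== SOURCE B (Python) =====
-- def loop_remove_repeat_departmentids(dpt_id, parent_id, department_ids, dataDept):
--     """Flatten dataDept into a parent-pointer map once, then walk it iteratively:
--     return None as soon as an ancestor is in department_ids, otherwise dpt_id."""
--     parents = {k: v.get('parent') for k, v in dataDept.items()}
--     ids = set(department_ids)
--     p = parent_id
--     while p not in (0, -1):
--         if p in ids:
--             return None
--         p = parents.get(p)
--         if p is None:
--             return dpt_id
--     return dpt_id
-- ===== Notes on version B (the rewrite author's own statement) =====
-- stated objective: idiomatic
-- what changed: B first flattens dataDept into a plain parent-pointer map with a dict comprehension (k -> v.get('parent')) and then walks that map with an iterative while-loop using a set for department_ids and a single merged missing/None test, instead of A's four-branch tail recursion over the nested dicts.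
import Mathlib
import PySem

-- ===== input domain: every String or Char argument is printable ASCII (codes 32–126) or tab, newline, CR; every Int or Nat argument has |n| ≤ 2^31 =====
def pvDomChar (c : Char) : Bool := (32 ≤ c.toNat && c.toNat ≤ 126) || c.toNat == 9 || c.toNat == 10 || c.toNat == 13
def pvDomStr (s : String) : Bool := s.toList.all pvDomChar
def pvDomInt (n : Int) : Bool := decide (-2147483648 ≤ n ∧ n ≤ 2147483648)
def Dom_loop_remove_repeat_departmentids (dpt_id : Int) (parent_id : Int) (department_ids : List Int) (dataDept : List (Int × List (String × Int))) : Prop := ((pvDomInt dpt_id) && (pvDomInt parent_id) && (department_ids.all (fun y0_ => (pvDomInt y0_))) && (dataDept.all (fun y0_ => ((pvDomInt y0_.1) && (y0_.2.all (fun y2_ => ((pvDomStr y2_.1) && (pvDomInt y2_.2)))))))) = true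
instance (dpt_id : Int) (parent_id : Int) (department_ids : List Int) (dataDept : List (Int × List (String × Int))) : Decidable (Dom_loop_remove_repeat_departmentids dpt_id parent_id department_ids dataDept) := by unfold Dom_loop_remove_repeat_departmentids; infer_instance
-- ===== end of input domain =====

-- B flattens dataDept once into a parent-pointer map and then walks it with an iterative
-- while-loop (set membership, merged missing-key test), instead of A's four-branch tail
-- recursion over the nested dicts; same return value wherever A returns.


-- ===== PORT A =====
-- `dataDept[p]` / `p in dataDept`: first-match association lookup (dict keys are unique)
def pvLookup : List (Int × List (String × Int)) → Int → Option (List (String × Int))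
  | [], _ => none
  | (k, v) :: rest, x => if k = x then some v else pvLookup rest x

-- `v['parent']` on the inner dict (none = KeyError)
def pvGetParent : List (String × Int) → Option Int
  | [] => none
  | (s, n) :: rest => if s = "parent" then some n else pvGetParent rest

-- A's tail recursion, with fuel only to make it total; fuel = |dataDept|+1 suffices on Pre_
def pvLoopA : Nat → Int → Int → List Int → List (Int × List (String × Int)) → Option Int
  | 0, _, _, _, _ => none  -- unreachable under Pre_ (Python would recurse forever / overflow)
  | fuel + 1, dpt_id, parent_id, department_ids, dataDept =>
    if parent_id = 0 ∨ parent_id = -1 then some dpt_id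
    else if parent_id ∈ department_ids then none
    else
      match pvLookup dataDept parent_id with
      | none => some dpt_id
      | some v =>
        match pvGetParent v with
        | none => some dpt_id  -- Python raises KeyError here; excluded by Pre_
        | some p' => pvLoopA fuel dpt_id p' department_ids dataDept

def loop_remove_repeat_departmentids (dpt_id : Int) (parent_id : Int) (department_ids : List Int) (dataDept : List (Int × List (String × Int))) : Option Int :=
  pvLoopA (dataDept.length + 1) dpt_id parent_id department_ids dataDept

-- ===== PORT B =====
-- `v.get('parent')` (dict.get: first match or None)
def pvParentOf (v : List (String × Int)) : Option Int :=
  (v.find? (fun e => e.1 == "parent")).map (·.2)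

-- `{k: v.get('parent') for k, v in dataDept.items()}`
def pvParentsMap (dataDept : List (Int × List (String × Int))) : PySem.Dict Int (Option Int) :=
  PySem.Dict.mk (dataDept.map (fun kv => (kv.1, pvParentOf kv.2)))

-- the while-loop; result: true = `return None` was executed, false = fell through to dpt_id.
-- fuel only for totality (unreachable at 0 under Pre_: Python B's loop would not terminate)
def pvClimb : Nat → Int → PySem.Set Int → PySem.Dict Int (Option Int) → Bool
  | 0, _, _, _ => true
  | fuel + 1, p, ids, parents =>
    if p = 0 ∨ p = -1 then false                       -- while p not in (0, -1) … (loop exits)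
    else if PySem.Set.contains ids p then true         -- return None
    else
      match (parents.getD p none) with                 -- p = parents.get(p)
      | none => false                                  -- if p is None: return dpt_id
      | some q => pvClimb fuel q ids parents

def loop_remove_repeat_departmentids_alt (dpt_id : Int) (parent_id : Int) (department_ids : List Int) (dataDept : List (Int × List (String × Int))) : Option Int :=
  if pvClimb (dataDept.length + 1) parent_id (PySem.Set.ofList department_ids) (pvParentsMap dataDept)
  then none else some dpt_id

-- ===== PRECONDITION & SPEC =====
-- Pre_'s own first-match lookups (independent of the ports)
def pvPreEntry (dataDept : List (Int × List (String × Int))) (p : Int) : Option (List (String × Int)) :=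
  (dataDept.find? (fun kv => kv.1 == p)).map (·.2)
def pvPreParent (v : List (String × Int)) : Option Int :=
  (v.find? (fun e => e.1 == "parent")).map (·.2)

-- Pre_ holds exactly when the Python A returns: the ancestor walk from parent_id reaches a
-- terminal (root 0/-1, a member of department_ids, or a key not in dataDept) without revisiting
-- a department (a revisit is a cycle: infinite recursion / RecursionError) and without reaching
-- an entry that lacks a 'parent' key (KeyError). `rem` holds the not-yet-visited keys and a
-- visited key is erased, so the walk is checked against distinct departments only; `gas` is
-- kept equal to rem.length purely to make the recursion structural (the 0 case is unreachable).
def pvChainReturns : Nat → List Int → Int → List Int → List (Int × List (String × Int)) → Bool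
  | gas, rem, p, department_ids, dataDept =>
    if p = 0 ∨ p = -1 then true
    else if p ∈ department_ids then true
    else
      match pvPreEntry dataDept p with
      | none => true
      | some v =>
        if p ∈ rem then
          match gas with
          | 0 => false  -- unreachable: p ∈ rem forces rem ≠ [], i.e. gas = rem.length ≥ 1
          | g + 1 =>
            match pvPreParent v with
            | none => false
            | some q => pvChainReturns g (rem.erase p) q department_ids dataDept
        else false

def Pre_loop_remove_repeat_departmentids (dpt_id : Int) (parent_id : Int) (department_ids : List Int) (dataDept : List (Int × List (String × Int))) : Prop :=
  pvChainReturns dataDept.length (dataDept.map Prod.fst) parent_id department_ids dataDept = true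
instance (dpt_id : Int) (parent_id : Int) (department_ids : List Int) (dataDept : List (Int × List (String × Int))) : Decidable (Pre_loop_remove_repeat_departmentids dpt_id parent_id department_ids dataDept) := by unfold Pre_loop_remove_repeat_departmentids; infer_instance

def pvWitness_loop_remove_repeat_departmentids : Int × Int × List Int × (List (Int × List (String × Int))) :=
  (1, 5, [2], [(5, [("parent", 3)]), (3, [("parent", 0)])])

def Spec_loop_remove_repeat_departmentids (dpt_id : Int) (parent_id : Int) (department_ids : List Int) (dataDept : List (Int × List (String × Int))) (out : Option Int) : Prop := out = loop_remove_repeat_departmentids_alt dpt_id parent_id department_ids dataDept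
instance (dpt_id : Int) (parent_id : Int) (department_ids : List Int) (dataDept : List (Int × List (String × Int))) (out : Option Int) : Decidable (Spec_loop_remove_repeat_departmentids dpt_id parent_id department_ids dataDept out) := by unfold Spec_loop_remove_repeat_departmentids; infer_instance

-- ===== CLAIM (what is proved, stated in full; the proofs are below) =====
def Claim_equal_loop_remove_repeat_departmentids : Prop := ∀ (dpt_id : Int) (parent_id : Int) (department_ids : List Int) (dataDept : List (Int × List (String × Int))), Dom_loop_remove_repeat_departmentids dpt_id parent_id department_ids dataDept → Pre_loop_remove_repeat_departmentids dpt_id parent_id department_ids dataDept → Spec_loop_remove_repeat_departmentids dpt_id parent_id department_ids dataDept (loop_remove_repeat_departmentids dpt_id parent_id department_ids dataDept)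

-- ===== LEMMAS AND PROOFS =====
-- v.get('parent') (B) computes A's v['parent'] lookup
theorem pvParentOf_eq (v : List (String × Int)) : pvParentOf v = pvGetParent v := by
  induction v with
  | nil => rfl
  | cons e es ih =>
    obtain ⟨s, n⟩ := e
    by_cases hs : s = "parent"
    · subst hs; simp [pvParentOf, pvGetParent, List.find?]
    · have hb : (s == "parent") = false := by simp [hs]
      simp only [pvParentOf, pvGetParent, List.find?, hb, if_neg hs] at *
      exact ih

-- B's flattened map looked up at p = A's two-stage lookup
theorem pvParentsMap_getD (dataDept : List (Int × List (String × Int))) (p : Int) :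
    (pvParentsMap dataDept).getD p none
      = (match pvLookup dataDept p with
         | none => none
         | some v => pvGetParent v) := by
  induction dataDept with
  | nil => rfl
  | cons kv rest ih =>
    obtain ⟨k, v⟩ := kv
    by_cases hk : k = p
    · subst hk
      simp [pvParentsMap, pvLookup, PySem.Dict.getD, PySem.Dict.get?, List.find?,
        pvParentOf_eq v]
    · have hb : (k == p) = false := by simp [hk]
      simp only [pvParentsMap, pvLookup, List.map_cons, PySem.Dict.getD,
        PySem.Dict.get?, List.find?, hb, if_neg hk] at *
      exact ih

-- the two walks agree step for step at every fuel (the fuel-0 defaults were chosen consistent)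
theorem pvLoopA_eq_climb (fuel : Nat) (dpt_id : Int) (department_ids : List Int)
    (dataDept : List (Int × List (String × Int))) : ∀ p : Int,
    pvLoopA fuel dpt_id p department_ids dataDept
      = (if pvClimb fuel p (PySem.Set.ofList department_ids) (pvParentsMap dataDept)
         then none else some dpt_id) := by
  induction fuel with
  | zero => intro p; simp [pvLoopA, pvClimb]
  | succ n ih =>
    intro p
    simp only [pvLoopA, pvClimb, pvParentsMap_getD]
    by_cases h0 : p = 0 ∨ p = -1
    · simp [h0]
    · by_cases hm : p ∈ department_ids
      · simp [h0, hm, PySem.Set.contains_eq_listContains, PySem.Set.mem_ofList]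
      · cases hL : pvLookup dataDept p with
        | none =>
          simp [h0, hm, hL, PySem.Set.contains_eq_listContains, PySem.Set.mem_ofList]
        | some v =>
          cases hP : pvGetParent v with
          | none =>
            simp [h0, hm, hL, hP, PySem.Set.contains_eq_listContains, PySem.Set.mem_ofList]
          | some q =>
            simp [h0, hm, hL, hP, ih q, PySem.Set.contains_eq_listContains, PySem.Set.mem_ofList]

-- ===== VERDICT (by name: the statement is the Claim_ definition above) =====
theorem loop_remove_repeat_departmentids_spec : Claim_equal_loop_remove_repeat_departmentids := by
  intro dpt_id parent_id department_ids dataDept _ _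
  unfold Spec_loop_remove_repeat_departmentids loop_remove_repeat_departmentids loop_remove_repeat_departmentids_alt
  exact pvLoopA_eq_climb _ _ _ _ _
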